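-- pv_equiv track=rewrite | github.com/EudOnline/infinitas-skill | tests/integration/test_private_registry_ui.py | _slice_top_level_function_source
-- ===== SOURCE A (Python) =====
-- def _slice_top_level_function_source(source: str, start_marker: str) -> str:
--     start = source.index(start_marker)
--     search_from = start + len(start_marker)
--     candidates = []
--     for marker in (
--         "\nasync function ",
--         "\nfunction ",
--         "\n// ============================================",
--     ):
--         idx = source.find(marker, search_from)
--         if idx != -1:
--             candidates.append(idx)
--     end = min(candidates) if candidates else len(source)
--     return source[start:end]
-- ===== SOURCE B (Python) =====
-- _MARKERS = (
--     "\nasync function ",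
--     "\nfunction ",
--     "\n// ============================================",
-- )
--
--
-- def _slice_top_level_function_source(source: str, start_marker: str) -> str:
--     start = source.index(start_marker)
--     i = start + len(start_marker)
--     n = len(source)
--     while i < n:
--         tail = source[i:]
--         if any(tail.startswith(m) for m in _MARKERS):
--             return source[start:i]
--         i += 1
--     return source[start:]
-- ===== Notes on version B (the rewrite author's own statement) =====
-- stated objective: alternative
-- what changed: Replaces the three separate source.find scans plus min() with a single forward scan from search_from that returns at the first position where the tail starts with any of the three markers, falling back to source[start:] when no boundary exists.
import Mathlib
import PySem

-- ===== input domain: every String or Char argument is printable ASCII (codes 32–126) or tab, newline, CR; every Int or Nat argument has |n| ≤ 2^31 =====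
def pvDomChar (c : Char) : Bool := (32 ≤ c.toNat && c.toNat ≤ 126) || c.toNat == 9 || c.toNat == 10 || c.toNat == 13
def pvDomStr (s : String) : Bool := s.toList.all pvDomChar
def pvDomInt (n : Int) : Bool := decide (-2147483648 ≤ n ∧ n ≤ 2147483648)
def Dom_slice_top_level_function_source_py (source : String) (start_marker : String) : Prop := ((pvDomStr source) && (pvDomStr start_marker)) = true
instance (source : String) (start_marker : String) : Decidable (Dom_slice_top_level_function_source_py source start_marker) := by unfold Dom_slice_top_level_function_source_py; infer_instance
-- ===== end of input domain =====

-- B replaces A's three separate find scans plus min() with one forward scan that stops at the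
-- first boundary marker (alternative decomposition, same asymptotic cost).


-- the three top-level boundary markers (shared data, used by both ports)
def pvMarkers : List String :=
  ["\nasync function ", "\nfunction ", "\n// ============================================"]

-- ===== PORT A =====
def slice_top_level_function_source_py (source : String) (start_marker : String) : String :=
  let start := PySem.Str.find source start_marker
  let search_from := start + PySem.Str.len start_marker
  let candidates := pvMarkers.foldl
    (fun acc marker =>
      if PySem.Str.findFrom source marker search_from != -1 then
        acc ++ [PySem.Str.findFrom source marker search_from]
      else acc) []
  let endIdx : Int :=
    match PySem.List.min? candidates (fun x => x) with
    | some m => m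
    | none => PySem.Str.len source
  PySem.Str.slice source (some start) (some endIdx)

-- ===== PORT B =====
-- the while loop of Source B: first index i with i0 ≤ i < n at which some marker prefixes s.drop i
def pvScanB (s : List Char) (n : Nat) (i : Nat) : Option Nat :=
  if _h : i < n then
    if pvMarkers.any (fun m => PySem.Chars.startswith (s.drop i) m.toList) then some i
    else pvScanB s n (i + 1)
  else none
termination_by n - i

def slice_top_level_function_source_py_alt (source : String) (start_marker : String) : String :=
  let start := PySem.Str.find source start_marker
  let i0 := (start + PySem.Str.len start_marker).toNat
  match pvScanB source.toList source.toList.length i0 with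
  | some j => PySem.Str.slice source (some start) (some (j : Int))
  | none => PySem.Str.slice source (some start) none

-- ===== PRECONDITION & SPEC =====
-- Pre_ excludes exactly the inputs where source.index(start_marker) raises ValueError
def Pre_slice_top_level_function_source_py (source : String) (start_marker : String) : Prop :=
  PySem.Str.isIn start_marker source = true

instance (source : String) (start_marker : String) : Decidable (Pre_slice_top_level_function_source_py source start_marker) := by unfold Pre_slice_top_level_function_source_py; infer_instance

def pvWitness_slice_top_level_function_source_py : String × String := ("function a() {}\nfunction b() {}", "function a")

def Spec_slice_top_level_function_source_py (source : String) (start_marker : String) (out : String) : Prop := out = slice_top_level_function_source_py_alt source start_marker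
instance (source : String) (start_marker : String) (out : String) : Decidable (Spec_slice_top_level_function_source_py source start_marker out) := by unfold Spec_slice_top_level_function_source_py; infer_instance

-- ===== CLAIM (what is proved, stated in full; the proofs are below) =====
def Claim_equal_slice_top_level_function_source_py : Prop := ∀ (source : String) (start_marker : String), Dom_slice_top_level_function_source_py source start_marker → Pre_slice_top_level_function_source_py source start_marker → Spec_slice_top_level_function_source_py source start_marker (slice_top_level_function_source_py source start_marker)

-- ===== LEMMAS AND PROOFS =====

-- "some marker matches at position j"
def pvAnyP (s : List Char) (j : Nat) : Bool :=
  pvMarkers.any (fun m => PySem.Chars.startswith (s.drop j) m.toList)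

lemma pvMarkers_ne_nil : ∀ m ∈ pvMarkers, m.toList ≠ [] := by decide

lemma pvScanB_none {s : List Char} {n i : Nat} (h : pvScanB s n i = none) :
    ∀ j, i ≤ j → j < n → pvAnyP s j = false := by
  intro j hij hjn
  induction i using pvScanB.induct s n with
  | case1 i hi hany =>
      rw [pvScanB, dif_pos hi, if_pos hany] at h; cases h
  | case2 i hi hany ih =>
      rw [pvScanB, dif_pos hi, if_neg hany] at h
      rcases Nat.eq_or_lt_of_le hij with rfl | hlt
      · simpa [pvAnyP] using hany
      · exact ih h hlt
  | case3 i hi => omega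

lemma pvScanB_some {s : List Char} {n i j : Nat} (h : pvScanB s n i = some j) :
    i ≤ j ∧ j < n ∧ pvAnyP s j = true ∧ ∀ l, i ≤ l → l < j → pvAnyP s l = false := by
  induction i using pvScanB.induct s n with
  | case1 i hi hany =>
      rw [pvScanB, dif_pos hi, if_pos hany] at h
      cases h
      exact ⟨le_refl _, hi, by simpa [pvAnyP] using hany, fun l h1 h2 => absurd h1 (by omega)⟩
  | case2 i hi hany ih =>
      rw [pvScanB, dif_pos hi, if_neg hany] at h
      obtain ⟨h1, h2, h3, h4⟩ := ih h
      refine ⟨by omega, h2, h3, fun l hl1 hl2 => ?_⟩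
      rcases Nat.eq_or_lt_of_le hl1 with rfl | hlt
      · simpa [pvAnyP] using hany
      · exact h4 l hlt hl2
  | case3 i hi =>
      rw [pvScanB, dif_neg hi] at h; cases h

-- a marker match needs the tail to be long enough
lemma pvMatch_lt_len {s : List Char} {j : Nat} {m : String} (hm : m ∈ pvMarkers)
    (hp : m.toList <+: s.drop j) : j < s.length := by
  by_contra hge
  rw [List.drop_eq_nil_of_le (by omega)] at hp
  exact pvMarkers_ne_nil m hm (List.prefix_nil.mp hp)

-- any-match at a concrete position, from one marker matching there
lemma pvAnyP_of_match {s : List Char} {j : Nat} {m : String} (hm : m ∈ pvMarkers)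
    (hp : m.toList <+: s.drop j) : pvAnyP s j = true :=
  List.any_eq_true.mpr ⟨m, hm, (PySem.Chars.startswith_iff _ _).mpr hp⟩

-- a non-(-1) findFrom result lands on a position ≥ k where pvAnyP holds
lemma pvFind_pos {s : List Char} {k : Nat} (hk : k ≤ s.length) {m : String} (hm : m ∈ pvMarkers)
    (hne : PySem.Chars.findFrom s m.toList (k : Int) none ≠ -1) :
    (k : Int) ≤ PySem.Chars.findFrom s m.toList (k : Int) none ∧
    pvAnyP s (PySem.Chars.findFrom s m.toList (k : Int) none).toNat = true := by
  obtain ⟨h1, h2, -⟩ := PySem.Chars.findFrom_natCast_spec s m.toList k hk hne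
  exact ⟨h1, pvAnyP_of_match hm h2⟩

theorem slice_top_level_function_source_py_spec_aux :
    ∀ (source : String) (start_marker : String),
    Pre_slice_top_level_function_source_py source start_marker →
    slice_top_level_function_source_py source start_marker
      = slice_top_level_function_source_py_alt source start_marker := by
  intro source start_marker hpre
  unfold Pre_slice_top_level_function_source_py at hpre
  rw [PySem.Str.isIn_eq, PySem.Chars.isIn_iff_infix] at hpre
  have hfne : PySem.Chars.find source.toList start_marker.toList ≠ -1 :=
    (PySem.Chars.find_ne_neg_one_iff _ _).mpr hpre
  have hfne0 : PySem.Chars.findFrom source.toList start_marker.toList ((0:Nat):Int) none ≠ -1 := by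
    simpa [PySem.Chars.findFrom_zero] using hfne
  obtain ⟨hge, hpfx, -⟩ :=
    PySem.Chars.findFrom_natCast_spec source.toList start_marker.toList 0 (Nat.zero_le _) hfne0
  simp only [Nat.cast_zero] at hge hpfx
  rw [PySem.Chars.findFrom_zero] at hge hpfx
  obtain ⟨st, hf0⟩ : ∃ st : Nat, PySem.Chars.find source.toList start_marker.toList = (st : Int) :=
    ⟨_, (Int.toNat_of_nonneg (by simpa using hge)).symm⟩
  rw [hf0] at hpfx
  simp only [Int.toNat_natCast] at hpfx
  have hstle : st ≤ source.toList.length := by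
    have := PySem.Chars.find_le_length source.toList start_marker.toList
    omega
  have hk : st + start_marker.toList.length ≤ source.toList.length := by
    have := hpfx.length_le
    simp only [List.length_drop] at this
    omega
  simp only [slice_top_level_function_source_py, slice_top_level_function_source_py_alt,
    PySem.Str.find_eq, PySem.Str.findFrom_eq, PySem.Str.len_eq, hf0]
  have hsf : ((st : Int) + (start_marker.toList.length : Int))
      = ((st + start_marker.toList.length : Nat) : Int) := by push_cast; ring
  rw [hsf]
  rw [PySem.List.foldl_append_if
    (fun marker => PySem.Chars.findFrom source.toList marker.toList
      ((st + start_marker.toList.length : Nat) : Int) none != -1)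
    (fun marker => PySem.Chars.findFrom source.toList marker.toList
      ((st + start_marker.toList.length : Nat) : Int) none)
    pvMarkers []]
  simp only [Int.toNat_natCast, List.nil_append]
  cases hscan : pvScanB source.toList source.toList.length (st + start_marker.toList.length) with
  | none =>
      have hnone := pvScanB_none hscan
      have hfilter : pvMarkers.filter
          (fun marker => PySem.Chars.findFrom source.toList marker.toList
            ((st + start_marker.toList.length : Nat) : Int) none != -1) = [] := by
        apply List.filter_eq_nil_iff.mpr
        intro m hm
        simp only [bne_iff_ne, ne_eq, not_not]
        by_contra hne
        obtain ⟨-, hany⟩ := pvFind_pos hk hm hne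
        obtain ⟨h1, h2, -⟩ := PySem.Chars.findFrom_natCast_spec source.toList m.toList _ hk hne
        have hlt := pvMatch_lt_len hm h2
        have hfalse := hnone _ (by omega) hlt
        exact absurd hany (by simpa using hfalse)
      rw [hfilter]
      simp only [List.map_nil]
      apply String.toList_inj.mp
      simp only [PySem.Str.toList_slice, PySem.Chars.slice_eq_listSlice]
      rw [PySem.List.slice_from_natCast]
      have : (PySem.List.min? ([] : List Int) (fun x => x)) = none := by
        simp [PySem.List.min?_eq_none_iff]
      rw [this]
      rw [PySem.List.slice_natCast]
      rw [List.take_of_length_le (by simp)]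
  | some j =>
      obtain ⟨hkj, hjn, hanyj, hmin⟩ := pvScanB_some hscan
      -- the marker that matches at j
      obtain ⟨m0, hm0, hp0⟩ := List.any_eq_true.mp hanyj
      rw [PySem.Chars.startswith_iff] at hp0
      have hg0ne : PySem.Chars.findFrom source.toList m0.toList
          ((st + start_marker.toList.length : Nat) : Int) none ≠ -1 := by
        rw [ne_eq, PySem.Chars.findFrom_natCast_eq_neg_one_iff _ _ _ hk]
        intro hcon
        apply hcon
        rw [← PySem.Chars.isIn_iff_infix, ← PySem.Chars.exists_prefix_drop_iff_isIn]
        exact ⟨j - (st + start_marker.toList.length), by rwa [List.drop_drop, Nat.add_sub_cancel' hkj]⟩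
      -- every non-(-1) findFrom value is ≥ j
      have hge_all : ∀ m ∈ pvMarkers,
          PySem.Chars.findFrom source.toList m.toList
            ((st + start_marker.toList.length : Nat) : Int) none ≠ -1 →
          (j : Int) ≤ PySem.Chars.findFrom source.toList m.toList
            ((st + start_marker.toList.length : Nat) : Int) none := by
        intro m hm hne
        obtain ⟨h1, hany⟩ := pvFind_pos hk hm hne
        by_contra hlt
        rw [not_le] at hlt
        have hnat : (PySem.Chars.findFrom source.toList m.toList
            ((st + start_marker.toList.length : Nat) : Int) none).toNat < j := by omega
        have hknat : st + start_marker.toList.length ≤ (PySem.Chars.findFrom source.toList m.toList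
            ((st + start_marker.toList.length : Nat) : Int) none).toNat := by omega
        exact absurd hany (by simpa using hmin _ hknat hnat)
      -- m0's findFrom value is exactly j
      have hg0 : PySem.Chars.findFrom source.toList m0.toList
          ((st + start_marker.toList.length : Nat) : Int) none = (j : Int) := by
        obtain ⟨h1, h2, h3⟩ :=
          PySem.Chars.findFrom_natCast_spec source.toList m0.toList _ hk hg0ne
        have hle : (PySem.Chars.findFrom source.toList m0.toList
            ((st + start_marker.toList.length : Nat) : Int) none).toNat ≤ j := by
          by_contra hgt
          exact h3 j hkj (by omega) hp0
        have := hge_all m0 hm0 hg0ne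
        omega
      -- j is in the candidate list
      have hjmem : (j : Int) ∈ (pvMarkers.filter
          (fun marker => PySem.Chars.findFrom source.toList marker.toList
            ((st + start_marker.toList.length : Nat) : Int) none != -1)).map
          (fun marker => PySem.Chars.findFrom source.toList marker.toList
            ((st + start_marker.toList.length : Nat) : Int) none) := by
        refine List.mem_map.mpr ⟨m0, List.mem_filter.mpr ⟨hm0, by simpa using hg0ne⟩, hg0⟩
      -- hence min? is some j
      have hminsome : PySem.List.min? ((pvMarkers.filter
          (fun marker => PySem.Chars.findFrom source.toList marker.toList
            ((st + start_marker.toList.length : Nat) : Int) none != -1)).map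
          (fun marker => PySem.Chars.findFrom source.toList marker.toList
            ((st + start_marker.toList.length : Nat) : Int) none)) (fun x => x) = some (j : Int) := by
        cases hm : PySem.List.min? ((pvMarkers.filter
            (fun marker => PySem.Chars.findFrom source.toList marker.toList
              ((st + start_marker.toList.length : Nat) : Int) none != -1)).map
            (fun marker => PySem.Chars.findFrom source.toList marker.toList
              ((st + start_marker.toList.length : Nat) : Int) none)) (fun x => x) with
        | none =>
            rw [PySem.List.min?_eq_none_iff] at hm
            rw [hm] at hjmem
            exact absurd hjmem (List.not_mem_nil)
        | some c =>
            have hc1 : c ≤ (j : Int) := PySem.List.min?_isMin hm _ hjmem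
            have hcmem := PySem.List.min?_mem hm
            obtain ⟨m1, hm1f, hm1e⟩ := List.mem_map.mp hcmem
            have hm1' := List.mem_filter.mp hm1f
            have hne1 : PySem.Chars.findFrom source.toList m1.toList
                ((st + start_marker.toList.length : Nat) : Int) none ≠ -1 := by
              have := hm1'.2; simpa using this
            have hc2 := hge_all m1 hm1'.1 hne1
            rw [hm1e] at hc2
            congr 1
            omega
      rw [hminsome]
  

-- ===== VERDICT (by name: the statement is the Claim_ definition above) =====
theorem slice_top_level_function_source_py_spec : Claim_equal_slice_top_level_function_source_py := by
  intro source start_marker _hdom hpre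
  exact slice_top_level_function_source_py_spec_aux source start_marker hpre
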